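-- pv_equiv track=rewrite | github.com/Joonspar/codetree-TILs | 240805/등차수열/arithmetic-sequence.py | max_arithmetic_sequence_count
-- ===== SOURCE A (Python) =====
-- def max_arithmetic_sequence_count(n, arr):
--     max_count = 0
--     count_dict = {}
--     for i in range(n):
--         for j in range(i + 1, n):
--             a_i, a_j = arr[i], arr[j]
--
--             if (a_i + a_j) % 2 == 0:
--                 k = (a_i + a_j) // 2
--                 if k in count_dict:
--                     count_dict[k] += 1
--                 else:
--                     count_dict[k] = 1
--                 max_count = max(max_count, count_dict[k])
--
--     return max_count
-- ===== SOURCE B (Python) =====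
-- def max_arithmetic_sequence_count(n, arr):
--     # Count pairs per midpoint from value multiplicities instead of scanning index pairs:
--     # C(c,2) same-value pairs, c_u*c_v for each distinct same-parity value pair.
--     xs = arr[:n] if n > 0 else []
--     freq = {}
--     for x in xs:
--         freq[x] = freq.get(x, 0) + 1
--     rest = list(freq.items())
--     pairs = {}
--     while rest:
--         (u, cu) = rest[0]
--         rest = rest[1:]
--         pairs[u] = pairs.get(u, 0) + cu * (cu - 1) // 2
--         for (v, cv) in rest:
--             if (u + v) % 2 == 0:
--                 m = (u + v) // 2
--                 pairs[m] = pairs.get(m, 0) + cu * cv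
--     return max(pairs.values(), default=0)
-- ===== Notes on version B (the rewrite author's own statement) =====
-- stated objective: alternative
-- what changed: A scans all O(n^2) index pairs, incrementing a midpoint dict with a running max; B first builds a value-frequency table, then counts pairs per midpoint combinatorially over distinct values only (C(c,2) for same-value pairs, c_u*c_v for each distinct same-parity value pair) and takes max of the totals at the end.
import Mathlib
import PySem

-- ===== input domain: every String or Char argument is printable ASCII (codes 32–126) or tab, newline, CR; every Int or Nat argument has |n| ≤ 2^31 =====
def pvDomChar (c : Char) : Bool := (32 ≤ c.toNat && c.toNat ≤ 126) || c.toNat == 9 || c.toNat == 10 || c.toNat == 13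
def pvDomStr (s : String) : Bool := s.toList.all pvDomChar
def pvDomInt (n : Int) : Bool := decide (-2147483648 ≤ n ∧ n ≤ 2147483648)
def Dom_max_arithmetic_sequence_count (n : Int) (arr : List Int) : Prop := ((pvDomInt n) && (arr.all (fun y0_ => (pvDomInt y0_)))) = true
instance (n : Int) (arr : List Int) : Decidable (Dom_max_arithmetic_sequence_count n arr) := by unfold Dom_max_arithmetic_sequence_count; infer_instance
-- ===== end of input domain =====

-- B replaces A's scan over all index pairs by a value-frequency table and a combinatorial
-- count per midpoint over distinct values (C(c,2) + products c_u*c_v); objective: alternative.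

-- ===== PORT A =====
def max_arithmetic_sequence_count (n : Int) (arr : List Int) : Int :=
  ((PySem.List.pyRange 0 n 1).foldl (fun st i =>
      (PySem.List.pyRange (i + 1) n 1).foldl (fun st j =>
        let a_i := PySem.List.pyGetD arr i 0
        let a_j := PySem.List.pyGetD arr j 0
        if PySem.Int.mod (a_i + a_j) 2 == 0 then
          let k := PySem.Int.floordiv (a_i + a_j) 2
          let d := if st.2.contains k then st.2.insert k (st.2.getD k 0 + 1)
                   else st.2.insert k 1
          (max st.1 (d.getD k 0), d)
        else st) st)
    ((0 : Int), (PySem.Dict.empty : PySem.Dict Int Int))).1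

-- ===== PORT B =====
-- the 'while rest:' loop of Source B, recursing on the remaining items list
def pvPairLoop : List (Int × Int) → PySem.Dict Int Int → PySem.Dict Int Int
  | [], pairs => pairs
  | (u, cu) :: rest, pairs =>
      let pairs1 := pairs.insert u (pairs.getD u 0 + PySem.Int.floordiv (cu * (cu - 1)) 2)
      let pairs2 := rest.foldl (fun d q =>
          if PySem.Int.mod (u + q.1) 2 == 0 then
            d.insert (PySem.Int.floordiv (u + q.1) 2)
              (d.getD (PySem.Int.floordiv (u + q.1) 2) 0 + cu * q.2)
          else d) pairs1
      pvPairLoop rest pairs2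

def max_arithmetic_sequence_count_alt (n : Int) (arr : List Int) : Int :=
  let xs := if n > 0 then PySem.List.slice arr none (some n) else []
  let freq := xs.foldl (fun d x => d.insert x (d.getD x 0 + 1)) (PySem.Dict.empty : PySem.Dict Int Int)
  let pairs := pvPairLoop freq.items PySem.Dict.empty
  (PySem.List.max? pairs.values (fun v => v)).getD 0

-- ===== PRECONDITION & SPEC =====
-- A indexes arr at all i < n, so it raises IndexError when n > len(arr) (unless n ≤ 1,
-- where the pair loop body never runs); Pre_ excludes exactly those crashing inputs.
def Pre_max_arithmetic_sequence_count (n : Int) (arr : List Int) : Prop :=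
  n ≤ 1 ∨ n ≤ (arr.length : Int)
instance (n : Int) (arr : List Int) : Decidable (Pre_max_arithmetic_sequence_count n arr) := by
  unfold Pre_max_arithmetic_sequence_count; infer_instance
def pvWitness_max_arithmetic_sequence_count : Int × List Int := (3, [1, 3, 5])

def Spec_max_arithmetic_sequence_count (n : Int) (arr : List Int) (out : Int) : Prop := out = max_arithmetic_sequence_count_alt n arr
instance (n : Int) (arr : List Int) (out : Int) : Decidable (Spec_max_arithmetic_sequence_count n arr out) := by unfold Spec_max_arithmetic_sequence_count; infer_instance

-- ===== CLAIM (what is proved, stated in full; the proofs are below) =====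
def Claim_equal_max_arithmetic_sequence_count : Prop := ∀ (n : Int) (arr : List Int), Dom_max_arithmetic_sequence_count n arr → Pre_max_arithmetic_sequence_count n arr → Spec_max_arithmetic_sequence_count n arr (max_arithmetic_sequence_count n arr)

-- ===== LEMMAS AND PROOFS =====

-- ---------- A-side: A = running max over the list of midpoints ----------

-- the per-midpoint step of A's loop body, after the 'k in dict' branch is collapsed
def pvStep (st : Int × PySem.Dict Int Int) (k : Int) : Int × PySem.Dict Int Int :=
  (max st.1 (st.2.getD k 0 + 1), st.2.insert k (st.2.getD k 0 + 1))

-- the midpoints A's pair loops enumerate, in order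
def pvMids (n : Int) (arr : List Int) : List Int :=
  (PySem.List.pyRange 0 n 1).flatMap (fun i =>
    ((PySem.List.pyRange (i + 1) n 1).filter
        (fun j => PySem.Int.mod (PySem.List.pyGetD arr i 0 + PySem.List.pyGetD arr j 0) 2 == 0)).map
      (fun j => PySem.Int.floordiv (PySem.List.pyGetD arr i 0 + PySem.List.pyGetD arr j 0) 2))

-- the same midpoints, enumerate/slice form over the truncated list
def pvMidsBaux (xs : List Int) : List Int :=
  (PySem.List.enumerate xs).flatMap (fun p =>
    ((PySem.List.slice xs (some (p.1 + 1)) none).filter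
        (fun y => PySem.Int.mod (p.2 + y) 2 == 0)).map
      (fun y => PySem.Int.floordiv (p.2 + y) 2))

-- the same midpoints, structural (tails) form
def pvMidsS : List Int → List Int
  | [] => []
  | x :: t => ((t.filter (fun y => PySem.Int.mod (x + y) 2 == 0)).map
      (fun y => PySem.Int.floordiv (x + y) 2)) ++ pvMidsS t

def pvXs (n : Int) (arr : List Int) : List Int :=
  if n > 0 then PySem.List.slice arr none (some n) else []

lemma pv_getD_zero_of_not_contains (d : PySem.Dict Int Int) (k : Int)
    (h : d.contains k = false) : d.getD k 0 = 0 := by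
  have h2 : d.get? k = none := (PySem.Dict.get?_eq_none_iff_contains d k).mpr h
  simp [PySem.Dict.getD, h2]

-- A's loop body equals pvStep
lemma pv_A_eq_foldl_mids (n : Int) (arr : List Int) :
    max_arithmetic_sequence_count n arr
      = ((pvMids n arr).foldl pvStep ((0 : Int), (PySem.Dict.empty : PySem.Dict Int Int))).1 := by
  unfold max_arithmetic_sequence_count pvMids
  rw [List.foldl_flatMap]
  refine congrArg Prod.fst ?_
  refine PySem.List.foldl_congr_mem _ _ _ _ ?_
  intro acc i _
  rw [List.foldl_map, ← PySem.List.foldl_if_eq_foldl_filter]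
  refine PySem.List.foldl_congr_mem _ _ _ _ ?_
  intro st j _
  simp only []
  by_cases hp : (PySem.Int.mod (PySem.List.pyGetD arr i 0 + PySem.List.pyGetD arr j 0) 2 == 0) = true
  · rw [if_pos hp, if_pos hp]
    by_cases hc : st.2.contains (PySem.Int.floordiv (PySem.List.pyGetD arr i 0 + PySem.List.pyGetD arr j 0) 2) = true
    · rw [if_pos hc]
      simp only [pvStep, PySem.Dict.getD_insert_self]
    · rw [if_neg hc]
      have h0 := pv_getD_zero_of_not_contains st.2 _ (Bool.eq_false_iff.mpr hc)
      simp only [pvStep, PySem.Dict.getD_insert_self, h0, zero_add]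
  · rw [if_neg hp, if_neg hp]

lemma pv_foldl_max_init (g : Int → Int) :
    ∀ (ks : List Int) (b v : Int),
      ks.foldl (fun a k => max a (g k)) (max b v)
        = max (ks.foldl (fun a k => max a (g k)) b) v := by
  intro ks
  induction ks with
  | nil => intro b v; rfl
  | cons k t ih =>
      intro b v
      simp only [List.foldl_cons]
      rw [max_right_comm b v (g k)]
      exact ih (max b (g k)) v

lemma pv_foldl_max_le (g : Int → Int) :
    ∀ (ks : List Int) (b X : Int), b ≤ X → (∀ k ∈ ks, g k ≤ X) →
      ks.foldl (fun a k => max a (g k)) b ≤ X := by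
  intro ks
  induction ks with
  | nil => intro b X hb _; exact hb
  | cons k t ih =>
      intro b X hb hk
      simp only [List.foldl_cons]
      exact ih (max b (g k)) X (max_le hb (hk k List.mem_cons_self)) (fun x hx => hk x (List.mem_cons_of_mem _ hx))

-- two 0-based max folds of the same nonneg function agree when each list covers
-- the other's positive-value elements
lemma pv_foldl_max_support_congr (g : Int → Int) (L1 L2 : List Int)
    (hg : ∀ k, 0 ≤ g k)
    (h12 : ∀ k ∈ L1, g k = 0 ∨ k ∈ L2) (h21 : ∀ k ∈ L2, g k = 0 ∨ k ∈ L1) :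
    L1.foldl (fun a k => max a (g k)) 0 = L2.foldl (fun a k => max a (g k)) 0 := by
  apply le_antisymm
  · refine pv_foldl_max_le g L1 0 _ (PySem.List.le_foldl_max_int L2 g 0).1 ?_
    intro k hk
    rcases h12 k hk with h0 | hmem
    · rw [h0]; exact (PySem.List.le_foldl_max_int L2 g 0).1
    · exact (PySem.List.le_foldl_max_int L2 g 0).2 k hmem
  · refine pv_foldl_max_le g L2 0 _ (PySem.List.le_foldl_max_int L1 g 0).1 ?_
    intro k hk
    rcases h21 k hk with h0 | hmem
    · rw [h0]; exact (PySem.List.le_foldl_max_int L1 g 0).1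
    · exact (PySem.List.le_foldl_max_int L1 g 0).2 k hmem

-- running max of incremental counts = max over final counts
lemma pv_run_fst :
    ∀ (L : List Int) (b : Int) (d : PySem.Dict Int Int),
      (L.foldl pvStep (b, d)).1
        = L.foldl (fun a k => max a (d.getD k 0 + (L.count k : Int))) b := by
  intro L
  induction L with
  | nil => intro b d; rfl
  | cons k0 t ih =>
      intro b d
      simp only [List.foldl_cons]
      rw [show pvStep (b, d) k0 = (max b (d.getD k0 0 + 1), d.insert k0 (d.getD k0 0 + 1)) from rfl]
      rw [ih]
      have hfun : (fun (a k : Int) => max a ((d.insert k0 (d.getD k0 0 + 1)).getD k 0 + (t.count k : Int)))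
          = (fun (a k : Int) => max a (d.getD k 0 + (((k0 :: t).count k : Nat) : Int))) := by
        funext a k
        rw [PySem.Dict.getD_insert]
        by_cases hk : k = k0
        · subst hk
          rw [if_pos rfl, List.count_cons_self]
          push_cast
          ring_nf
        · rw [if_neg hk]
          rw [List.count_cons_of_ne (Ne.symm hk)]
      rw [hfun]
      rcases Nat.eq_zero_or_pos (t.count k0) with hz | hpos
      · rw [List.count_cons_self, hz]
        norm_num
      · have hmem : k0 ∈ t := List.count_pos_iff.mp hpos
        rw [pv_foldl_max_init, pv_foldl_max_init]
        have h1 := (PySem.List.le_foldl_max_int t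
          (fun k => d.getD k 0 + (((k0 :: t).count k : Nat) : Int)) b).2 k0 hmem
        simp only [List.count_cons_self] at h1 ⊢
        have h2 : (0 : Int) ≤ (t.count k0 : Int) := by positivity
        omega

lemma pv_pyGetD_take (arr : List Int) (m : Nat) (j : Int) (d : Int)
    (h0 : 0 ≤ j) (h1 : j < (m : Int)) (h2 : (m : Int) ≤ (arr.length : Int)) :
    PySem.List.pyGetD (arr.take m) j d = PySem.List.pyGetD arr j d := by
  have hjm : j.toNat < m := by omega
  have hlt : ((arr.take m).length : Int) = (m : Int) := by
    rw [List.length_take]; omega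
  rw [PySem.List.pyGetD_eq_getElem (arr.take m) d h0 (by omega),
      PySem.List.pyGetD_eq_getElem arr d h0 (by omega)]
  exact List.getElem_take

lemma pv_mids_eq_baux (n : Int) (arr : List Int)
    (h : Pre_max_arithmetic_sequence_count n arr) :
    pvMids n arr = pvMidsBaux (pvXs n arr) := by
  unfold pvMids pvMidsBaux pvXs
  by_cases h0 : n ≤ 0
  · rw [PySem.List.pyRange_one_eq_nil h0, if_neg (by omega)]
    rfl
  · rw [if_pos (by omega), PySem.List.slice_to arr (by omega : (0:Int) ≤ n)]
    by_cases hlen : n ≤ (arr.length : Int)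
    case neg =>
      have hn1 : n = 1 := by
        rcases h with h1 | h2
        · omega
        · omega
      subst hn1
      have harr : arr = [] := by
        have hl0 : arr.length = 0 := by omega
        exact List.eq_nil_of_length_eq_zero hl0
      subst harr
      rw [show (PySem.List.pyRange 0 1 1) = [0] from PySem.List.pyRange_one_singleton 0]
      simp [PySem.List.pyRange_one_eq_nil]
    case pos =>
      have hlx : (((arr.take n.toNat).length : Nat) : Int) = n := by
        rw [List.length_take]; omega
      rw [PySem.List.enumerate_eq_map_pyRange (arr.take n.toNat) 0, List.flatMap_map]
      have hlen' : PySem.List.len (arr.take n.toNat) = n := by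
        rw [PySem.List.len_eq]; exact hlx
      rw [hlen']
      have hmain : ∀ i ∈ PySem.List.pyRange 0 n 1,
          (((PySem.List.pyRange (i + 1) n 1).filter
              (fun j => PySem.Int.mod (PySem.List.pyGetD arr i 0 + PySem.List.pyGetD arr j 0) 2 == 0)).map
            (fun j => PySem.Int.floordiv (PySem.List.pyGetD arr i 0 + PySem.List.pyGetD arr j 0) 2))
          = ((fun p : Int × Int =>
              ((PySem.List.slice (arr.take n.toNat) (some (p.1 + 1)) none).filter
                  (fun y => PySem.Int.mod (p.2 + y) 2 == 0)).map
                (fun y => PySem.Int.floordiv (p.2 + y) 2))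
              (i, PySem.List.pyGetD (arr.take n.toNat) i 0)) := by
        intro i hi
        have hib := PySem.List.mem_pyRange_one.mp hi
        have hgi : PySem.List.pyGetD (arr.take n.toNat) i 0 = PySem.List.pyGetD arr i 0 :=
          pv_pyGetD_take arr n.toNat i 0 hib.1 (by omega) (by omega)
        simp only
        rw [PySem.List.slice_from (List.take n.toNat arr) (show (0:Int) ≤ i + 1 by omega)]
        rw [← PySem.List.map_pyGetD_pyRange (arr.take n.toNat) 0 (show (0:Int) ≤ i + 1 by omega)]
        rw [hlen']
        rw [List.filter_map, List.map_map]
        have hfilter : ∀ j ∈ PySem.List.pyRange (i + 1) n 1,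
            ((fun j => PySem.Int.mod (PySem.List.pyGetD arr i 0 + PySem.List.pyGetD arr j 0) 2 == 0) j)
              = (((fun y => PySem.Int.mod (PySem.List.pyGetD (arr.take n.toNat) i 0 + y) 2 == 0) ∘
                  (fun j => PySem.List.pyGetD (arr.take n.toNat) j 0)) j) := by
          intro j hj
          have hjb := PySem.List.mem_pyRange_one.mp hj
          have hgj : PySem.List.pyGetD (arr.take n.toNat) j 0 = PySem.List.pyGetD arr j 0 :=
            pv_pyGetD_take arr n.toNat j 0 (by omega) (by omega) (by omega)
          simp only [Function.comp, hgi, hgj]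
        rw [List.filter_congr hfilter]
        refine List.map_congr_left ?_
        intro j hj
        have hjb := PySem.List.mem_pyRange_one.mp (List.mem_of_mem_filter hj)
        have hgj : PySem.List.pyGetD (arr.take n.toNat) j 0 = PySem.List.pyGetD arr j 0 :=
          pv_pyGetD_take arr n.toNat j 0 (by omega) (by omega) (by omega)
        simp only [Function.comp, hgi, hgj]
      calc (PySem.List.pyRange 0 n 1).flatMap (fun i =>
              ((PySem.List.pyRange (i + 1) n 1).filter
                  (fun j => PySem.Int.mod (PySem.List.pyGetD arr i 0 + PySem.List.pyGetD arr j 0) 2 == 0)).map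
                (fun j => PySem.Int.floordiv (PySem.List.pyGetD arr i 0 + PySem.List.pyGetD arr j 0) 2))
          = (PySem.List.pyRange 0 n 1).flatMap (fun i =>
              (fun p : Int × Int =>
                ((PySem.List.slice (arr.take n.toNat) (some (p.1 + 1)) none).filter
                    (fun y => PySem.Int.mod (p.2 + y) 2 == 0)).map
                  (fun y => PySem.Int.floordiv (p.2 + y) 2))
                (i, PySem.List.pyGetD (arr.take n.toNat) i 0)) := by
            simp only [List.flatMap_def]
            exact congrArg List.flatten (List.map_congr_left hmain)
        _ = _ := rfl

-- enumerate/slice form = structural tails form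
lemma pv_baux_general :
    ∀ (t l : List Int) (s : Int), 0 ≤ s → l.drop s.toNat = t →
      (PySem.List.enumerate t s).flatMap (fun p =>
        ((PySem.List.slice l (some (p.1 + 1)) none).filter
            (fun y => PySem.Int.mod (p.2 + y) 2 == 0)).map
          (fun y => PySem.Int.floordiv (p.2 + y) 2)) = pvMidsS t := by
  intro t
  induction t with
  | nil => intro l s _ _; simp [PySem.List.enumerate_nil, pvMidsS]
  | cons x t' ih =>
      intro l s hs hdrop
      rw [PySem.List.enumerate_cons, List.flatMap_cons]
      have hslice : PySem.List.slice l (some (s + 1)) none = t' := by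
        rw [PySem.List.slice_from l (by omega : (0:Int) ≤ s + 1)]
        have : (s + 1).toNat = s.toNat + 1 := by omega
        rw [this, ← List.tail_drop, hdrop]
        rfl
      rw [hslice]
      rw [ih l (s + 1) (by omega) (by
        have : (s + 1).toNat = s.toNat + 1 := by omega
        rw [this, ← List.tail_drop, hdrop]; rfl)]
      rfl

lemma pv_mids_eq (n : Int) (arr : List Int)
    (h : Pre_max_arithmetic_sequence_count n arr) :
    pvMids n arr = pvMidsS (pvXs n arr) := by
  rw [pv_mids_eq_baux n arr h]
  unfold pvMidsBaux
  exact pv_baux_general (pvXs n arr) (pvXs n arr) 0 le_rfl (by simp)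

-- ---------- arithmetic: even-sum midpoint characterisation ----------

lemma pv_mid_iff (u v k : Int) :
    ((PySem.Int.mod (u + v) 2 == 0) = true ∧ PySem.Int.floordiv (u + v) 2 = k) ↔ v = 2 * k - u := by
  constructor
  · rintro ⟨he, hf⟩
    have hdvd : (2 : Int) ∣ (u + v) := by
      have := (PySem.Int.mod_eq_zero_iff_dvd (u + v) 2).mp (by
        have := of_decide_eq_true (by exact_mod_cast he)
        exact_mod_cast (beq_iff_eq.mp he))
      exact this
    obtain ⟨m, hm⟩ := hdvd
    have : PySem.Int.floordiv (u + v) 2 = m := by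
      rw [(PySem.Int.floordiv_eq_iff_of_pos (by omega))]
      omega
    omega
  · intro hv
    subst hv
    have hsum : u + (2 * k - u) = 2 * k := by ring
    constructor
    · rw [hsum]
      have : PySem.Int.mod (2 * k) 2 = 0 :=
        (PySem.Int.mod_eq_zero_iff_dvd (2 * k) 2).mpr ⟨k, rfl⟩
      simp [this]
    · rw [hsum, (PySem.Int.floordiv_eq_iff_of_pos (by omega))]
      omega

lemma pv_even_half (m : Int) (h : (2 : Int) ∣ m) :
    2 * PySem.Int.floordiv m 2 = m := by
  obtain ⟨t, ht⟩ := h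
  have : PySem.Int.floordiv m 2 = t := by
    rw [(PySem.Int.floordiv_eq_iff_of_pos (by omega))]
    omega
  omega

lemma pv_choose2 (m : Int) : 2 * PySem.Int.floordiv (m * (m - 1)) 2 = m * (m - 1) := by
  apply pv_even_half
  rcases Int.even_or_odd m with ⟨t, ht⟩ | ⟨t, ht⟩
  · exact ⟨t * (m - 1), by rw [ht]; ring⟩
  · exact ⟨m * t, by rw [ht]; ring⟩

-- ---------- counting midpoints: structural form ----------

def pvF : List Int → Int → Int
  | [], _ => 0
  | x :: t, k => (t.count (2 * k - x) : Int) + pvF t k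

lemma pv_count_midsS (l : List Int) (k : Int) :
    ((pvMidsS l).count k : Int) = pvF l k := by
  induction l with
  | nil => simp [pvMidsS, pvF]
  | cons x t ih =>
      rw [pvMidsS, pvF, List.count_append]
      push_cast
      rw [ih]
      congr 1
      have h1 : ((t.filter (fun y => PySem.Int.mod (x + y) 2 == 0)).map
            (fun y => PySem.Int.floordiv (x + y) 2)).count k
          = (t.filter (fun y => PySem.Int.mod (x + y) 2 == 0)).countP
              (fun y => PySem.Int.floordiv (x + y) 2 == k) := by
        simp only [List.count, List.countP_map]
        exact List.countP_congr (fun y _ => Iff.rfl)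
      rw [h1, List.countP_filter]
      have h2 : (fun y => (PySem.Int.floordiv (x + y) 2 == k) && (PySem.Int.mod (x + y) 2 == 0))
          = (fun y => y == 2 * k - x) := by
        funext y
        have hiff := pv_mid_iff x y k
        rw [Bool.eq_iff_iff, Bool.and_eq_true, beq_iff_eq, beq_iff_eq, beq_iff_eq]
        constructor
        · rintro ⟨hf, he⟩
          exact hiff.mp ⟨beq_iff_eq.mpr he, hf⟩
        · intro hy
          rcases hiff.mpr hy with ⟨h1', h2'⟩
          exact ⟨h2', beq_iff_eq.mp h1'⟩
      rw [h2]
      simp [List.count]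

-- pvF via the full-list double count: 2*pvF l k = S l k - count k
lemma pv_count_ite_sum (t : List Int) (v : Int) :
    ((t.map (fun y => if y = v then (1 : Int) else 0)).sum) = (t.count v : Int) := by
  induction t with
  | nil => simp
  | cons x t ih =>
      simp only [List.map_cons, List.sum_cons, ih, List.count_cons]
      by_cases hx : x = v
      · subst hx; simp; omega
      · simp [hx, Ne.symm hx]

lemma pv_two_f (l : List Int) (k : Int) :
    2 * pvF l k = ((l.map (fun x => (l.count (2 * k - x) : Int))).sum) - (l.count k : Int) := by
  induction l with
  | nil => simp [pvF]
  | cons x t ih =>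
      rw [pvF]
      have hmap : (t.map (fun y => (((x :: t).count (2 * k - y) : Nat) : Int))).sum
          = (t.map (fun y => (t.count (2 * k - y) : Int))).sum + (t.count (2 * k - x) : Int) := by
        have hpt : ∀ y, (((x :: t).count (2 * k - y) : Nat) : Int)
            = (t.count (2 * k - y) : Int) + (if y = 2 * k - x then (1:Int) else 0) := by
          intro y
          rw [List.count_cons]
          by_cases hy : y = 2 * k - x
          · have h' : (2 * k - y) = x := by omega
            rw [h']
            push_cast
            simp [hy]
          · have h' : ¬ ((2 : Int) * k - y = x) := by omega
            push_cast
            simp [h', hy]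
            omega
        calc (t.map (fun y => (((x :: t).count (2 * k - y) : Nat) : Int))).sum
            = (t.map (fun y => (t.count (2 * k - y) : Int) + (if y = 2 * k - x then (1:Int) else 0))).sum := by
              exact congrArg List.sum (List.map_congr_left (fun y _ => hpt y))
          _ = (t.map (fun y => (t.count (2 * k - y) : Int))).sum
                + (t.map (fun y => if y = 2 * k - x then (1:Int) else 0)).sum := by
              rw [← List.sum_map_add]
          _ = _ := by rw [pv_count_ite_sum]
      have hcx : ((x :: t).count (2 * k - x) : Int) = (t.count (2 * k - x) : Int) + (if x = k then (1:Int) else 0) := by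
        by_cases hx : x = k
        · have h' : (2 : Int) * k - x = x := by omega
          rw [List.count_cons, h']
          push_cast
          simp [hx]
        · have h' : ¬ ((2 : Int) * k - x = x) := by omega
          rw [List.count_cons]
          push_cast
          simp [h', hx]
          omega
      have hck : ((x :: t).count k : Int) = (t.count k : Int) + (if x = k then (1:Int) else 0) := by
        rw [List.count_cons]
        by_cases hx : x = k
        · push_cast; simp [hx]
        · push_cast; simp [hx]
      rw [List.map_cons, List.sum_cons, hmap, hcx, hck]
      by_cases hx : x = k <;> simp only [hx, if_pos, if_neg, reduceIte] <;> omega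

-- ---------- B-side: the pair loop as a weighted-counter fold ----------

def pvWStep (d : PySem.Dict Int Int) (p : Int × Int) : PySem.Dict Int Int :=
  d.insert p.1 (d.getD p.1 0 + p.2)

def pvInner (u cu : Int) (q : Int × Int) : Option (Int × Int) :=
  if PySem.Int.mod (u + q.1) 2 == 0 then
    some (PySem.Int.floordiv (u + q.1) 2, cu * q.2)
  else none

def pvContribs : List (Int × Int) → List (Int × Int)
  | [] => []
  | (u, cu) :: rest =>
      (u, PySem.Int.floordiv (cu * (cu - 1)) 2) :: (rest.filterMap (pvInner u cu) ++ pvContribs rest)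

def pvWsum (L : List (Int × Int)) (k : Int) : Int :=
  ((L.filter (fun p => p.1 == k)).map Prod.snd).sum

lemma pv_wsum_cons (a : Int × Int) (L : List (Int × Int)) (k : Int) :
    pvWsum (a :: L) k = (if a.1 = k then a.2 else 0) + pvWsum L k := by
  unfold pvWsum
  by_cases h : a.1 = k
  · simp [h]
  · simp [h]

lemma pv_wsum_append (L1 L2 : List (Int × Int)) (k : Int) :
    pvWsum (L1 ++ L2) k = pvWsum L1 k + pvWsum L2 k := by
  unfold pvWsum
  rw [List.filter_append, List.map_append, List.sum_append]

lemma pv_foldl_if_filterMap (u cu : Int) :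
    ∀ (rest : List (Int × Int)) (d : PySem.Dict Int Int),
      rest.foldl (fun d q =>
          if PySem.Int.mod (u + q.1) 2 == 0 then
            d.insert (PySem.Int.floordiv (u + q.1) 2)
              (d.getD (PySem.Int.floordiv (u + q.1) 2) 0 + cu * q.2)
          else d) d
        = (rest.filterMap (pvInner u cu)).foldl pvWStep d := by
  intro rest
  induction rest with
  | nil => intro d; rfl
  | cons q t ih =>
      intro d
      rw [List.foldl_cons, List.filterMap_cons]
      by_cases hq : (PySem.Int.mod (u + q.1) 2 == 0) = true
      · rw [if_pos hq]
        have : pvInner u cu q = some (PySem.Int.floordiv (u + q.1) 2, cu * q.2) := by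
          unfold pvInner; rw [if_pos hq]
        rw [this, List.foldl_cons, ih]
        rfl
      · rw [if_neg hq]
        have : pvInner u cu q = none := by
          unfold pvInner; rw [if_neg hq]
        rw [this, ih]

lemma pv_pairLoop_eq_wfold :
    ∀ (its : List (Int × Int)) (d : PySem.Dict Int Int),
      pvPairLoop its d = (pvContribs its).foldl pvWStep d := by
  intro its
  induction its with
  | nil => intro d; rfl
  | cons p rest ih =>
      intro d
      obtain ⟨u, cu⟩ := p
      rw [pvPairLoop, pvContribs, List.foldl_cons, List.foldl_append]
      rw [pv_foldl_if_filterMap, ih]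
      rfl

lemma pv_getD_wfold :
    ∀ (L : List (Int × Int)) (d : PySem.Dict Int Int) (k : Int),
      (L.foldl pvWStep d).getD k 0 = d.getD k 0 + pvWsum L k := by
  intro L
  induction L with
  | nil => intro d k; simp [pvWsum]
  | cons p t ih =>
      intro d k
      rw [List.foldl_cons, ih, pv_wsum_cons]
      unfold pvWStep
      rw [PySem.Dict.getD_insert]
      by_cases h : k = p.1
      · rw [if_pos h]
        subst h
        simp
        ring_nf
      · rw [if_neg h]
        have : ¬ (p.1 = k) := fun hc => h hc.symm
        simp [this]

lemma pv_keys_wfold (L : List (Int × Int)) :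
    (L.foldl pvWStep (PySem.Dict.empty : PySem.Dict Int Int)).keys
      = PySem.Set.ofList (L.map Prod.fst) := by
  have h : (L.foldl (fun d p => d.insert p.1 (d.getD p.1 0 + p.2)) (PySem.Dict.empty : PySem.Dict Int Int)).keys
      = PySem.Set.update (PySem.Dict.empty : PySem.Dict Int Int).keys (L.map Prod.fst) :=
    PySem.Dict.keys_foldl_insert_key L Prod.fst (fun d p => d.getD p.1 0 + p.2) _
  have h2 : (L.foldl pvWStep (PySem.Dict.empty : PySem.Dict Int Int))
      = (L.foldl (fun d p => d.insert p.1 (d.getD p.1 0 + p.2)) (PySem.Dict.empty : PySem.Dict Int Int)) := rfl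
  rw [h2, h]
  rw [show (PySem.Dict.empty : PySem.Dict Int Int).keys = [] from rfl]
  exact PySem.Set.update_nil_left _

lemma pv_nodup_keys_wfold (L : List (Int × Int)) :
    (L.foldl pvWStep (PySem.Dict.empty : PySem.Dict Int Int)).keys.Nodup := by
  have := PySem.Dict.nodup_keys_foldl_insert_key L Prod.fst
    (fun d p => d.getD p.1 0 + p.2) (PySem.Dict.empty : PySem.Dict Int Int) (by simp [PySem.Dict.keys_empty])
  exact this

-- max(values, default=0) of a nonneg fold = 0-based running max over keys
lemma pv_maxD_values (K : List Int) (g : Int → Int) (hg : ∀ k ∈ K, 0 ≤ g k) :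
    (PySem.List.max? (K.map g) (fun v => v)).getD 0
      = K.foldl (fun a k => max a (g k)) 0 := by
  cases K with
  | nil => rfl
  | cons k0 t =>
      rw [List.map_cons, PySem.List.max?_id_cons]
      simp only [Option.getD_some]
      rw [List.foldl_map]
      have h0 : max (0 : Int) (g k0) = g k0 := max_eq_right (hg k0 List.mem_cons_self)
      rw [List.foldl_cons, h0]

-- ---------- the combinatorial identity ----------

def pvItems (c : Int → Int) (G : List Int) : List (Int × Int) := G.map (fun u => (u, c u))

def pvSS (c : Int → Int) (G : List Int) (k : Int) : Int :=
  (G.map (fun u => if (2 * k - u) ∈ G then c u * c (2 * k - u) else 0)).sum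

-- sum over a nodup list of an indicator
lemma pv_sum_indicator (h : Int → Int) (v : Int) :
    ∀ (R : List Int), R.Nodup →
      ((R.map (fun a => if a = v then h a else 0)).sum) = (if v ∈ R then h v else 0) := by
  intro R
  induction R with
  | nil => simp
  | cons x t ih =>
      intro hnd
      rw [List.map_cons, List.sum_cons, ih hnd.of_cons]
      by_cases hx : x = v
      · subst hx
        have : x ∉ t := (List.nodup_cons.mp hnd).1
        simp [this]
      · simp [hx, List.mem_cons, Ne.symm hx]

-- the filterMap contribution of one head u against the rest R
lemma pv_wsum_inner (c : Int → Int) (u cu k : Int) :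
    ∀ (R : List Int), R.Nodup →
      pvWsum ((pvItems c R).filterMap (pvInner u cu)) k
        = (if (2 * k - u) ∈ R then cu * c (2 * k - u) else 0) := by
  intro R
  induction R with
  | nil => simp [pvItems, pvWsum]
  | cons v t ih =>
      intro hnd
      have hrest := ih hnd.of_cons
      have hmemiff : ((2 * k - u) ∈ v :: t) ↔ (v = 2 * k - u ∨ (2 * k - u) ∈ t) := by
        constructor
        · intro hc
          rcases List.mem_cons.mp hc with hh | ht
          · exact Or.inl hh.symm
          · exact Or.inr ht
        · rintro (hh | ht)
          · rw [hh]; exact List.mem_cons_self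
          · exact List.mem_cons_of_mem v ht
      simp only [pvItems, List.map_cons, List.filterMap_cons] at hrest ⊢
      by_cases he : (PySem.Int.mod (u + v) 2 == 0) = true
      · have hinner : pvInner u cu (v, c v) = some (PySem.Int.floordiv (u + v) 2, cu * c v) := by
          unfold pvInner; rw [if_pos he]
        rw [hinner, pv_wsum_cons, hrest]
        by_cases hv : v = 2 * k - u
        · have hmid := (pv_mid_iff u v k).mpr hv
          have hfk : (PySem.Int.floordiv (u + v) 2, cu * c v).1 = k := hmid.2
          rw [if_pos hfk]
          have hnot : (2 * k - u) ∉ t := by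
            rw [← hv]; exact (List.nodup_cons.mp hnd).1
          rw [if_neg hnot, if_pos (hmemiff.mpr (Or.inl hv))]
          simp [hv]
        · have hfne : (PySem.Int.floordiv (u + v) 2, cu * c v).1 ≠ k := by
            intro hf
            exact hv ((pv_mid_iff u v k).mp ⟨he, hf⟩)
          rw [if_neg hfne]
          by_cases hm : (2 * k - u) ∈ t
          · rw [if_pos hm, if_pos (hmemiff.mpr (Or.inr hm))]; ring
          · rw [if_neg hm, if_neg (fun hc => by rcases hmemiff.mp hc with h | h; exacts [hv h, hm h])]
            ring
      · have hinner : pvInner u cu (v, c v) = none := by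
          unfold pvInner; rw [if_neg he]
        rw [hinner, hrest]
        have hv : v ≠ 2 * k - u := fun hh => he ((pv_mid_iff u v k).mpr hh).1
        by_cases hm : (2 * k - u) ∈ t
        · rw [if_pos hm, if_pos (hmemiff.mpr (Or.inr hm))]
        · rw [if_neg hm, if_neg (fun hc => by rcases hmemiff.mp hc with h | h; exacts [hv h, hm h])]

def pvWG (c : Int → Int) (G : List Int) (k : Int) : Int :=
  pvWsum (pvContribs (pvItems c G)) k

lemma pv_two_wg (c : Int → Int) (k : Int) :
    ∀ (G : List Int), G.Nodup →
      2 * pvWG c G k = pvSS c G k - (if k ∈ G then c k else 0) := by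
  intro G
  induction G with
  | nil => simp [pvWG, pvSS, pvItems, pvContribs, pvWsum]
  | cons u R ih =>
      intro hnd
      have huR : u ∉ R := (List.nodup_cons.mp hnd).1
      have hndR : R.Nodup := hnd.of_cons
      have ihr := ih hndR
      have hch := pv_choose2 (c u)
      -- expand LHS
      have hl : pvWG c (u :: R) k
          = (if u = k then PySem.Int.floordiv (c u * (c u - 1)) 2 else 0)
            + (if (2 * k - u) ∈ R then c u * c (2 * k - u) else 0)
            + pvWG c R k := by
        simp only [pvWG, pvItems, List.map_cons]
        rw [pvContribs, pv_wsum_cons, pv_wsum_append]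
        have hin := pv_wsum_inner c u (c u) k R hndR
        simp only [pvItems] at hin
        rw [hin]
        simp only []
        ring
      -- expand RHS sum
      have hss : pvSS c (u :: R) k
          = (if (2 * k - u) ∈ u :: R then c u * c (2 * k - u) else 0)
            + pvSS c R k
            + (if (2 * k - u) ∈ R then c (2 * k - u) * c u else 0) := by
        unfold pvSS
        rw [List.map_cons, List.sum_cons]
        have hpt : ∀ a ∈ R,
            (if (2 * k - a) ∈ u :: R then c a * c (2 * k - a) else 0)
              = (if (2 * k - a) ∈ R then c a * c (2 * k - a) else 0)
                + (if a = 2 * k - u then c a * c (2 * k - a) else 0) := by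
          intro a ha
          by_cases hau : a = 2 * k - u
          · have h2ka : 2 * k - a = u := by omega
            rw [h2ka]
            rw [if_pos List.mem_cons_self, if_neg huR, if_pos hau]
            ring
          · have h2ka : 2 * k - a ≠ u := by omega
            have hiffm : ((2 * k - a) ∈ u :: R) ↔ ((2 * k - a) ∈ R) := by
              constructor
              · intro hc
                rcases List.mem_cons.mp hc with hh | ht
                · exact absurd hh h2ka
                · exact ht
              · exact List.mem_cons_of_mem u
            rw [if_neg hau]
            by_cases hm : (2 * k - a) ∈ R
            · rw [if_pos (hiffm.mpr hm), if_pos hm]; ring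
            · rw [if_neg (fun hc => hm (hiffm.mp hc)), if_neg hm]; ring
        have hsum : (R.map (fun a => if (2 * k - a) ∈ u :: R then c a * c (2 * k - a) else 0)).sum
            = (R.map (fun a => if (2 * k - a) ∈ R then c a * c (2 * k - a) else 0)).sum
              + (R.map (fun a => if a = 2 * k - u then c a * c (2 * k - a) else 0)).sum := by
          rw [← List.sum_map_add]
          exact congrArg List.sum (List.map_congr_left hpt)
        rw [hsum]
        have hind := pv_sum_indicator (fun a => c a * c (2 * k - a)) (2 * k - u) R hndR
        rw [hind]
        have hre : (if (2 * k - u) ∈ R then c (2 * k - u) * c (2 * k - (2 * k - u)) else 0)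
            = (if (2 * k - u) ∈ R then c (2 * k - u) * c u else 0) := by
          by_cases hm : (2 * k - u) ∈ R
          · rw [if_pos hm, if_pos hm]
            congr 2
            omega
          · rw [if_neg hm, if_neg hm]
        rw [hre]
        ring
      by_cases huk : u = k
      · subst huk
        have h2ku : 2 * u - u = u := by ring
        rw [h2ku] at hl hss
        rw [hl, hss]
        rw [if_pos rfl, if_neg huR, if_pos List.mem_cons_self, if_pos List.mem_cons_self]
        rw [if_neg huR] at ihr
        have hsq : c u * (c u - 1) = c u * c u - c u := by ring
        -- goal : 2 * (fd + 0 + WG R) = c u * c u + SS R + 0 - c u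
        linarith [hch, hsq, ihr]
      · have h2ku_ne : 2 * k - u ≠ u := by omega
        rw [hl, hss]
        rw [if_neg huk]
        have hmemiff : ((2 * k - u) ∈ u :: R) ↔ ((2 * k - u) ∈ R) := by
          constructor
          · intro hc
            rcases List.mem_cons.mp hc with hh | ht
            · exact absurd hh h2ku_ne
            · exact ht
          · exact List.mem_cons_of_mem u
        have hkiff : (k ∈ u :: R) ↔ (k ∈ R) := by
          constructor
          · intro hc
            rcases List.mem_cons.mp hc with hh | ht
            · exact absurd hh.symm huk
            · exact ht
          · exact List.mem_cons_of_mem u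
        have hcomm : c (2 * k - u) * c u = c u * c (2 * k - u) := by ring
        by_cases hm : (2 * k - u) ∈ R
        · rw [if_pos hm, if_pos (hmemiff.mpr hm), if_pos hm, hcomm]
          by_cases hk : k ∈ R
          · rw [if_pos (hkiff.mpr hk)]
            rw [if_pos hk] at ihr
            linarith [ihr]
          · rw [if_neg (fun hc => hk (hkiff.mp hc))]
            rw [if_neg hk] at ihr
            linarith [ihr]
        · rw [if_neg hm, if_neg (fun hc => hm (hmemiff.mp hc)), if_neg hm]
          by_cases hk : k ∈ R
          · rw [if_pos (hkiff.mpr hk)]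
            rw [if_pos hk] at ihr
            linarith [ihr]
          · rw [if_neg (fun hc => hk (hkiff.mp hc))]
            rw [if_neg hk] at ihr
            linarith [ihr]

-- grouping: sum over elements = sum over distinct values weighted by count
lemma pv_group_sum (xs : List Int) (g : Int → Int) :
    (xs.map (fun x => g x)).sum
      = ((PySem.Set.ofList xs).map (fun u => (xs.count u : Int) * g u)).sum := by
  have h1 : (xs.map g).sum = ∑ m ∈ xs.toFinset, (xs.count m) • g m :=
    Finset.sum_list_map_count xs g
  have hnd : (PySem.Set.ofList xs).Nodup := PySem.Set.nodup_ofList xs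
  have h2 : ((PySem.Set.ofList xs).map (fun u => (xs.count u : Int) * g u)).sum
      = ∑ m ∈ (PySem.Set.ofList xs).toFinset, (xs.count m : Int) * g m := by
    rw [List.sum_toFinset _ hnd]
  have h3 : (PySem.Set.ofList xs).toFinset = xs.toFinset := by
    apply Finset.ext
    intro a
    simp [List.mem_toFinset, PySem.Set.mem_ofList]
  rw [h1, h2, h3]
  apply Finset.sum_congr rfl
  intro m _
  simp

-- the full identity: B's combinatorial weight = A's midpoint count
lemma pv_wg_eq_f (xs : List Int) (k : Int) :
    pvWG (fun v => (xs.count v : Int)) (PySem.Set.ofList xs) k = pvF xs k := by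
  set c : Int → Int := fun v => (xs.count v : Int) with hc
  set D := PySem.Set.ofList xs with hD
  have hndD : D.Nodup := PySem.Set.nodup_ofList xs
  have h1 : 2 * pvWG c D k = pvSS c D k - (if k ∈ D then c k else 0) := pv_two_wg c k D hndD
  have h2 : 2 * pvF xs k = ((xs.map (fun x => c (2 * k - x))).sum) - c k := pv_two_f xs k
  have h3 : pvSS c D k = (xs.map (fun x => c (2 * k - x))).sum := by
    rw [pv_group_sum xs (fun x => c (2 * k - x))]
    unfold pvSS
    apply congrArg List.sum
    apply List.map_congr_left
    intro u hu
    by_cases hm : (2 * k - u) ∈ D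
    · rw [if_pos hm]
    · rw [if_neg hm]
      have : (2 * k - u) ∉ xs := fun hx => hm (by rw [hD]; exact (PySem.Set.mem_ofList _ _).mpr hx)
      have hz : c (2 * k - u) = 0 := by
        rw [hc]
        simp [List.count_eq_zero_of_not_mem this]
      rw [hz]
      ring
  have h4 : (if k ∈ D then c k else 0) = c k := by
    by_cases hm : k ∈ D
    · rw [if_pos hm]
    · rw [if_neg hm]
      have : k ∉ xs := fun hx => hm (by rw [hD]; exact (PySem.Set.mem_ofList _ _).mpr hx)
      rw [hc]
      simp [List.count_eq_zero_of_not_mem this]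
  omega

-- membership: every midpoint with a positive count is a key of B's dict
lemma pv_mid_mem_keys (c : Int → Int) (x y k : Int) (hsum : x + y = 2 * k) :
    ∀ (G : List Int), x ∈ G → y ∈ G →
      k ∈ (pvContribs (pvItems c G)).map Prod.fst := by
  intro G
  induction G with
  | nil => intro hx _; exact absurd hx List.not_mem_nil
  | cons u R ih =>
      intro hx hy
      rw [show pvItems c (u :: R) = (u, c u) :: pvItems c R from rfl, pvContribs]
      rw [List.map_cons]
      by_cases hxy : x = y
      · have hxk : x = k := by omega
        rcases List.mem_cons.mp hx with hh | ht
        · exact List.mem_cons.mpr (Or.inl (show k = ((u, PySem.Int.floordiv (c u * (c u - 1)) 2)).1 by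
            show k = u; omega))
        · refine List.mem_cons_of_mem _ ?_
          rw [List.map_append]
          exact List.mem_append_right _ (ih ht (hxy ▸ ht))
      · rcases List.mem_cons.mp hx with hhx | htx
        · have hyR : y ∈ R := by
            rcases List.mem_cons.mp hy with hhy | hty
            · exact absurd (by omega : x = y) hxy
            · exact hty
          refine List.mem_cons_of_mem _ ?_
          rw [List.map_append]
          refine List.mem_append_left _ ?_
          have hmid := (pv_mid_iff u y k).mpr (by omega)
          have hinner : pvInner u (c u) (y, c y) = some (PySem.Int.floordiv (u + y) 2, (c u) * c y) := by
            unfold pvInner; rw [if_pos hmid.1]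
          have hmem : (PySem.Int.floordiv (u + y) 2, (c u) * c y) ∈ (pvItems c R).filterMap (pvInner u (c u)) := by
            apply List.mem_filterMap.mpr
            exact ⟨(y, c y), List.mem_map.mpr ⟨y, hyR, rfl⟩, hinner⟩
          exact List.mem_map.mpr ⟨_, hmem, hmid.2⟩
        · rcases List.mem_cons.mp hy with hhy | hty
          · refine List.mem_cons_of_mem _ ?_
            rw [List.map_append]
            refine List.mem_append_left _ ?_
            have hmid := (pv_mid_iff u x k).mpr (by omega)
            have hinner : pvInner u (c u) (x, c x) = some (PySem.Int.floordiv (u + x) 2, (c u) * c x) := by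
              unfold pvInner; rw [if_pos hmid.1]
            have hmem : (PySem.Int.floordiv (u + x) 2, (c u) * c x) ∈ (pvItems c R).filterMap (pvInner u (c u)) := by
              apply List.mem_filterMap.mpr
              exact ⟨(x, c x), List.mem_map.mpr ⟨x, htx, rfl⟩, hinner⟩
            exact List.mem_map.mpr ⟨_, hmem, hmid.2⟩
          · refine List.mem_cons_of_mem _ ?_
            rw [List.map_append]
            exact List.mem_append_right _ (ih htx hty)

-- every element of the structural midpoint list comes from a pair of elements
lemma pv_midsS_pair :
    ∀ (xs : List Int) (k : Int), k ∈ pvMidsS xs →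
      ∃ x y, x ∈ xs ∧ y ∈ xs ∧ x + y = 2 * k := by
  intro xs
  induction xs with
  | nil => intro k hk; exact absurd hk (by simp [pvMidsS])
  | cons x t ih =>
      intro k hk
      rw [pvMidsS] at hk
      rcases List.mem_append.mp hk with hh | ht
      · obtain ⟨y, hy, hval⟩ := List.mem_map.mp hh
        have hyt := List.mem_of_mem_filter hy
        have heven := List.of_mem_filter hy
        have := (pv_mid_iff x y k).mp ⟨heven, hval⟩
        exact ⟨x, y, List.mem_cons_self, List.mem_cons_of_mem x hyt, by omega⟩
      · obtain ⟨a, b, ha, hb, hab⟩ := ih k ht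
        exact ⟨a, b, List.mem_cons_of_mem x ha, List.mem_cons_of_mem x hb, hab⟩

lemma pv_midsS_mem_keys (xs : List Int) (k : Int)
    (hk : k ∈ pvMidsS xs) :
    k ∈ (pvContribs (pvItems (fun v => (xs.count v : Int)) (PySem.Set.ofList xs))).map Prod.fst := by
  obtain ⟨x, y, hx, hy, hxy⟩ := pv_midsS_pair xs k hk
  exact pv_mid_mem_keys _ x y k hxy (PySem.Set.ofList xs)
    ((PySem.Set.mem_ofList _ _).mpr hx) ((PySem.Set.mem_ofList _ _).mpr hy)

-- B in closed form: 0-based running max over the keys, of the midpoint count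
lemma pv_B_closed (n : Int) (arr : List Int) :
    max_arithmetic_sequence_count_alt n arr
      = (PySem.Set.ofList ((pvContribs (pvItems (fun v => ((pvXs n arr).count v : Int))
            (PySem.Set.ofList (pvXs n arr)))).map Prod.fst)).foldl
          (fun a k => max a (((pvMidsS (pvXs n arr)).count k : Int))) 0 := by
  set xs := pvXs n arr with hxs
  set c : Int → Int := fun v => (xs.count v : Int) with hc
  set L := pvContribs (pvItems c (PySem.Set.ofList xs)) with hL
  have hgd : ∀ k, (L.foldl pvWStep (PySem.Dict.empty : PySem.Dict Int Int)).getD k 0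
      = ((pvMidsS xs).count k : Int) := by
    intro k
    rw [pv_getD_wfold, PySem.Dict.getD_empty, zero_add, pv_count_midsS]
    exact pv_wg_eq_f xs k
  have h0 : max_arithmetic_sequence_count_alt n arr
      = (PySem.List.max? ((L.foldl pvWStep (PySem.Dict.empty : PySem.Dict Int Int)).values) (fun v => v)).getD 0 := by
    show (PySem.List.max? (pvPairLoop (xs.foldl (fun d x => d.insert x (d.getD x 0 + 1))
        (PySem.Dict.empty : PySem.Dict Int Int)).items PySem.Dict.empty).values (fun v => v)).getD 0 = _
    rw [PySem.Dict.foldl_insert_getD_add_one_eq_counter, PySem.Dict.items_counter,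
        pv_pairLoop_eq_wfold]
    rfl
  rw [h0, PySem.Dict.values_eq_map_keys _ (pv_nodup_keys_wfold L) 0, pv_keys_wfold L]
  rw [pv_maxD_values _ _ (fun k _ => by rw [hgd k]; positivity)]
  apply PySem.List.foldl_congr_mem
  intro a k _
  rw [hgd k]

-- ===== VERDICT (by name: the statement is the Claim_ definition above) =====
theorem max_arithmetic_sequence_count_spec : Claim_equal_max_arithmetic_sequence_count := by
  intro n arr _ hpre
  unfold Spec_max_arithmetic_sequence_count
  set xs := pvXs n arr with hxs
  set M := pvMidsS xs with hM
  set K := PySem.Set.ofList ((pvContribs (pvItems (fun v => (xs.count v : Int))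
      (PySem.Set.ofList xs))).map Prod.fst) with hK
  have hA : max_arithmetic_sequence_count n arr
      = M.foldl (fun a k => max a ((M.count k : Int))) 0 := by
    rw [pv_A_eq_foldl_mids, pv_run_fst, pv_mids_eq n arr hpre]
    apply PySem.List.foldl_congr_mem
    intro a k _
    rw [PySem.Dict.getD_empty]
    ring_nf
    rfl
  have hB : max_arithmetic_sequence_count_alt n arr
      = K.foldl (fun a k => max a ((M.count k : Int))) 0 := pv_B_closed n arr
  rw [hA, hB]
  apply pv_foldl_max_support_congr
  · intro k; positivity
  · intro k hk
    right
    rw [hK]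
    exact (PySem.Set.mem_ofList _ _).mpr (pv_midsS_mem_keys xs k hk)
  · intro k hk
    rcases Nat.eq_zero_or_pos (M.count k) with hz | hpos
    · left; exact_mod_cast congrArg (Nat.cast : Nat → Int) hz
    · right; exact List.count_pos_iff.mp hpos
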